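-- pv_equiv track=rewrite | github.com/gptcompany/UTXOracle | scripts/backtest/cross_validation.py | time_series_split
-- ===== SOURCE A (Python) =====
-- def time_series_split(
--     data_length: int,
--     n_splits: int = 5,
--     test_size: int | None = None,
-- ) -> list[tuple[tuple[int, int], tuple[int, int]]]:
--     """Time series cross-validation split (expanding window).
--
--     Unlike k-fold, this respects temporal ordering:
--     train on past, validate on future.
--
--     Args:
--         data_length: Total number of data points
--         n_splits: Number of splits
--         test_size: Size of each test set (default: 1/n_splits of data)
--
--     Returns:
--         List of ((train_start, train_end), (test_start, test_end))
--     """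
--     if test_size is None:
--         test_size = data_length // (n_splits + 1)
--
--     if test_size < 1:
--         test_size = 1
--
--     splits = []
--     min_train_size = test_size  # At least as much training as test
--
--     for i in range(n_splits):
--         test_end = data_length - i * test_size
--         test_start = test_end - test_size
--
--         if test_start < min_train_size:
--             break
--
--         train_start = 0
--         train_end = test_start
--
--         splits.append(((train_start, train_end), (test_start, test_end)))
--
--     # Reverse to go from earliest to latest
--     return list(reversed(splits))
-- ===== SOURCE B (Python) =====
-- def time_series_split(
--     data_length: int,
--     n_splits: int = 5,
--     test_size: int | None = None,
-- ) -> list[tuple[tuple[int, int], tuple[int, int]]]: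
--     """Expanding-window CV splits as one comprehension over the arithmetic
--     progression of test-start boundaries (no fold index, no break, no reversal)."""
--     if test_size is None:
--         test_size = data_length // (n_splits + 1)
--     if test_size < 1:
--         test_size = 1
--     k = min(n_splits, data_length // test_size - 1)
--     return [((0, s), (s, s + test_size))
--             for s in range(data_length - k * test_size, data_length, test_size)]
-- ===== Notes on version B (the rewrite author's own statement) =====
-- stated objective: alternative
-- what changed: Replaces A's indexed backward loop with a break and a final reversal by a single comprehension over the arithmetic progression of test-start boundaries range(data_length - k*test_size, data_length, test_size), each fold read off directly as ((0,s),(s,s+test_size)); no fold index, no break, no reversal.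
import Mathlib
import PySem

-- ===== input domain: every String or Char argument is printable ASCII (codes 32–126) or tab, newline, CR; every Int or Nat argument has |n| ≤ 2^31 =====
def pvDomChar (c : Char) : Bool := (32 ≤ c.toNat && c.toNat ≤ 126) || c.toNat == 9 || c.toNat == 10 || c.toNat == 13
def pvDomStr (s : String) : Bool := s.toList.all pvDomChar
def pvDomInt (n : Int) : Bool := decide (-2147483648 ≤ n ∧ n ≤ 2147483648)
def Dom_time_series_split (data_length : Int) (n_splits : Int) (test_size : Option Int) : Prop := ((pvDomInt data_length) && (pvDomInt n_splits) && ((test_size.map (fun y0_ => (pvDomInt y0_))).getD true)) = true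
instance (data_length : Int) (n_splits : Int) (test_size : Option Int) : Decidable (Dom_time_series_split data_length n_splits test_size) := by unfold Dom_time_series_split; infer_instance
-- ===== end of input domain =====

-- B builds the splits as one map over the arithmetic progression of test-start
-- boundaries (a single range with step test_size) instead of A's indexed backward
-- loop with a break and a final reversal (objective: alternative decomposition, same cost).

-- ===== PORT A =====
-- A's for-loop with break: recurse over the remaining range(n_splits) fuel, appending like Python.
def tssLoopA (data_length t i : Int) (fuel : Nat)
    (acc : List ((Int × Int) × (Int × Int))) : List ((Int × Int) × (Int × Int)) :=
  match fuel with
  | 0 => acc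
  | fuel + 1 =>
    let test_end := data_length - i * t
    let test_start := test_end - t
    if test_start < t then acc
    else tssLoopA data_length t (i + 1) fuel
      (acc ++ [((0, test_start), (test_start, test_end))])

def time_series_split (data_length : Int) (n_splits : Int) (test_size : Option Int) : List ((Int × Int) × (Int × Int)) :=
  let t0 := match test_size with
    | none => PySem.Int.floordiv data_length (n_splits + 1)
    | some t => t
  let t := if t0 < 1 then 1 else t0
  (tssLoopA data_length t 0 n_splits.toNat []).reverse

-- ===== PORT B =====
def time_series_split_alt (data_length : Int) (n_splits : Int) (test_size : Option Int) : List ((Int × Int) × (Int × Int)) :=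
  let t0 := match test_size with
    | none => PySem.Int.floordiv data_length (n_splits + 1)
    | some t => t
  let t := if t0 < 1 then 1 else t0
  let k := min n_splits (PySem.Int.floordiv data_length t - 1)
  (PySem.List.pyRange (data_length - k * t) data_length t).map
    (fun s => ((0, s), (s, s + t)))

-- ===== PRECONDITION & SPEC =====
-- Pre_ excludes only test_size = None with n_splits = -1, where A (and B) raise ZeroDivisionError.
def Pre_time_series_split (data_length : Int) (n_splits : Int) (test_size : Option Int) : Prop :=
  test_size.isSome ∨ n_splits ≠ -1
instance (data_length : Int) (n_splits : Int) (test_size : Option Int) : Decidable (Pre_time_series_split data_length n_splits test_size) := by unfold Pre_time_series_split; infer_instance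
def pvWitness_time_series_split : Int × Int × Option Int := (20, 4, none)

def Spec_time_series_split (data_length : Int) (n_splits : Int) (test_size : Option Int) (out : List ((Int × Int) × (Int × Int))) : Prop := out = time_series_split_alt data_length n_splits test_size
instance (data_length : Int) (n_splits : Int) (test_size : Option Int) (out : List ((Int × Int) × (Int × Int))) : Decidable (Spec_time_series_split data_length n_splits test_size out) := by unfold Spec_time_series_split; infer_instance

-- ===== CLAIM (what is proved, stated in full; the proofs are below) =====
def Claim_equal_time_series_split : Prop := ∀ (data_length : Int) (n_splits : Int) (test_size : Option Int), Dom_time_series_split data_length n_splits test_size → Pre_time_series_split data_length n_splits test_size → Spec_time_series_split data_length n_splits test_size (time_series_split data_length n_splits test_size)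

-- ===== LEMMAS AND PROOFS =====

theorem tssLoopA_char (L t : Int) (ht : 1 ≤ t) (fd : Int) (hfd : fd = PySem.Int.floordiv L t) :
    ∀ (fuel : Nat) (i : Int) (acc : List ((Int × Int) × (Int × Int))),
    tssLoopA L t i fuel acc =
      acc ++ (List.range (min fuel (fd - 1 - i).toNat)).map (fun (m : Nat) =>
        ((0, L - (i + (m : Int)) * t - t),
         (L - (i + (m : Int)) * t - t, L - (i + (m : Int)) * t))) := by
  intro fuel
  induction fuel with
  | zero => intro i acc; simp [tssLoopA]
  | succ f ih =>
    intro i acc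
    rw [tssLoopA]
    by_cases hbr : L - i * t - t < t
    · have hfd2 : fd < i + 2 := by
        rw [hfd, PySem.Int.floordiv_lt_iff_lt_mul (show (0:Int) < t by omega)]
        nlinarith
      have h0 : (fd - 1 - i).toNat = 0 := by omega
      simp [hbr, h0]
    · have hfd2 : i + 2 ≤ fd := by
        rw [hfd, PySem.Int.le_floordiv_iff_mul_le (show (0:Int) < t by omega)]
        nlinarith
      have hN : min (f + 1) (fd - 1 - i).toNat = min f (fd - 1 - (i + 1)).toNat + 1 := by
        omega
      simp only [if_neg hbr, ih (i + 1) (acc ++ [((0, L - i * t - t), (L - i * t - t, L - i * t))])]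
      rw [hN, List.range_succ_eq_map]
      simp only [List.map_cons, List.map_map, List.append_assoc, List.singleton_append]
      congr 1
      apply List.cons_eq_cons.mpr
      refine ⟨by norm_num, ?_⟩
      apply List.map_congr_left
      intro m _
      simp only [Function.comp_apply]
      push_cast
      ring_nf

theorem reverse_map_range {α : Type} (K : Nat) (g : Nat → α) :
    ((List.range K).map g).reverse = (List.range K).map (fun m => g (K - 1 - m)) := by
  apply List.ext_getElem
  · simp
  · intro j h1 h2
    simp only [List.getElem_reverse, List.getElem_map, List.getElem_range, List.length_map,
      List.length_range] at *

theorem count_div (k t : Int) (ht : 1 ≤ t) : (k * t + t - 1) / t = k := by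
  have h1 : (k * t + t - 1) = (t - 1) + k * t := by ring
  rw [h1, Int.add_mul_ediv_right _ _ (by omega : t ≠ 0),
    Int.ediv_eq_zero_of_lt (by omega) (by omega)]
  omega

theorem tss_key (L n t0 : Int) :
    (tssLoopA L (if t0 < 1 then 1 else t0) 0 n.toNat []).reverse =
    (PySem.List.pyRange
        (L - min n (PySem.Int.floordiv L (if t0 < 1 then 1 else t0) - 1) * (if t0 < 1 then 1 else t0))
        L (if t0 < 1 then 1 else t0)).map
      (fun s => ((0, s), (s, s + (if t0 < 1 then 1 else t0)))) := by
  set t : Int := if t0 < 1 then 1 else t0 with htdef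
  have ht : 1 ≤ t := by rw [htdef]; split <;> omega
  set fd : Int := PySem.Int.floordiv L t with hfd
  set k : Int := min n (fd - 1) with hkdef
  set K : Nat := min n.toNat (fd - 1).toNat with hK
  have hfdL : fd * t ≤ L := by
    rw [hfd]
    exact (PySem.Int.le_floordiv_iff_mul_le (a := L) (b := t)
      (show (0:Int) < t by omega)).mp le_rfl
  have hKk : (K : Int) = max k 0 := by rw [hK, hkdef]; omega
  rw [tssLoopA_char L t ht fd hfd n.toNat 0 []]
  rw [show (fd - 1 - 0).toNat = (fd - 1).toNat by omega]
  simp only [List.nil_append]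
  rw [reverse_map_range]
  rw [PySem.List.pyRange_of_pos _ _ (show (0:Int) < t by omega)]
  by_cases hkpos : 0 < k
  · have ha : L - k * t < L := by nlinarith
    have hNum : L - (L - k * t) + t - 1 = k * t + t - 1 := by ring
    rw [if_pos ha, hNum, count_div k t ht]
    have hKeq : k.toNat = K := by omega
    rw [hKeq, List.map_map]
    apply List.map_congr_left
    intro m hm
    rw [List.mem_range] at hm
    simp only [Function.comp_apply]
    have hc : ((K - 1 - m : Nat) : Int) = k - 1 - (m : Int) := by omega
    have hs : L - k * t + t * (m : Int) = L - (0 + ((K - 1 - m : Nat) : Int)) * t - t := by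
      rw [hc]; ring
    rw [← hs]
    have hs2 : L - (0 + ((K - 1 - m : Nat) : Int)) * t = L - k * t + t * (m : Int) + t := by
      rw [hc]; ring
    rw [hs2]
  · have hK0 : K = 0 := by omega
    have ha : ¬ (L - k * t < L) := by
      push_neg
      nlinarith [mul_nonneg (by omega : (0:Int) ≤ -k) (by omega : (0:Int) ≤ t)]
    rw [if_neg ha, ← hK, hK0]
    simp

-- ===== VERDICT (by name: the statement is the Claim_ definition above) =====
theorem time_series_split_spec : Claim_equal_time_series_split := by
  intro L n ts _ _
  unfold Spec_time_series_split time_series_split time_series_split_alt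
  cases ts with
  | none => exact tss_key L n (PySem.Int.floordiv L (n + 1))
  | some v => exact tss_key L n v
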